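-- pv_equiv track=rewrite | github.com/Alea4jacta6est/algorithms_codeforces | 3_binary_search_and_stack/fast_search.py | fast_search
-- ===== SOURCE A (Python) =====
-- import bisect
--
-- def fast_search(array, queries):
--     sorted_array = sorted(array)
--     responses = [0] * len(queries)
--     for i, request in enumerate(queries):
--         left = bisect.bisect_left(sorted_array, request[0])
--         right = bisect.bisect_right(sorted_array, request[1])
--         responses[i] = right - left
--     return responses
-- ===== SOURCE B (Python) =====
-- def fast_search(array, queries):
--     # No sort, no bisect: one linear scan of the original array per query,
--     # counting elements <= hi and elements < lo; the answer is their difference.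
--     responses = []
--     for lo, hi in queries:
--         le_hi = 0
--         lt_lo = 0
--         for x in array:
--             if x <= hi:
--                 le_hi += 1
--             if x < lo:
--                 lt_lo += 1
--         responses.append(le_hi - lt_lo)
--     return responses
-- ===== Notes on version B (the rewrite author's own statement) =====
-- stated objective: simpler
-- what changed: Replaced sort-then-binary-search with a direct linear scan of the unsorted array per query, counting elements <= hi and elements < lo and returning their difference.
import Mathlib
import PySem

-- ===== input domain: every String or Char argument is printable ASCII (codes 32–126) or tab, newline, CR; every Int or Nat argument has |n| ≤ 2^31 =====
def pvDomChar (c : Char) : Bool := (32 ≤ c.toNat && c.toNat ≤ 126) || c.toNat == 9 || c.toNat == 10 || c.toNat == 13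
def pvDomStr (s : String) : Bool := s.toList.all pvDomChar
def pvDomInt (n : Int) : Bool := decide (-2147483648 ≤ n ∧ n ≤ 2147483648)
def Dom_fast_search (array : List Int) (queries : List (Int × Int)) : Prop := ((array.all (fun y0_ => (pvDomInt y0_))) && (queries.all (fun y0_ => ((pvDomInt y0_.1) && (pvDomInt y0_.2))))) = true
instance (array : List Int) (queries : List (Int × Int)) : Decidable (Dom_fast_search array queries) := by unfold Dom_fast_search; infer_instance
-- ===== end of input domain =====

-- B replaces A's sort + binary searches by a direct per-query linear scan of the
-- unsorted array (count of elements ≤ hi minus count of elements < lo): simpler, no sort.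

-- ===== PORT A =====
-- sorted_array = sorted(array); for each query: bisect_right(..) - bisect_left(..)
def fast_search (array : List Int) (queries : List (Int × Int)) : List Int :=
  let sorted_array := PySem.List.sorted array (fun x => x) false
  queries.map (fun request =>
    let left := PySem.List.bisectLeft sorted_array request.1
    let right := PySem.List.bisectRight sorted_array request.2
    (right : Int) - (left : Int))

-- ===== PORT B =====
-- for each (lo, hi): one fold over the original array maintaining (le_hi, lt_lo)
def fast_search_alt (array : List Int) (queries : List (Int × Int)) : List Int :=
  queries.map (fun q =>
    let c := array.foldl (fun (acc : Int × Int) x =>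
      (if x ≤ q.2 then acc.1 + 1 else acc.1,
       if x < q.1 then acc.2 + 1 else acc.2)) (0, 0)
    c.1 - c.2)

-- ===== PRECONDITION & SPEC =====
def Spec_fast_search (array : List Int) (queries : List (Int × Int)) (out : List Int) : Prop := out = fast_search_alt array queries
instance (array : List Int) (queries : List (Int × Int)) (out : List Int) : Decidable (Spec_fast_search array queries out) := by unfold Spec_fast_search; infer_instance

-- ===== CLAIM (what is proved, stated in full; the proofs are below) =====
def Claim_equal_fast_search : Prop := ∀ (array : List Int) (queries : List (Int × Int)), Dom_fast_search array queries → Spec_fast_search array queries (fast_search array queries)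

-- ===== LEMMAS AND PROOFS =====

-- countP equals k when the predicate holds exactly on the first k positions
theorem pv_countP_eq_of_indices (s : List Int) (p : Int → Bool) (k : Nat) (hk : k ≤ s.length)
    (h1 : ∀ (j : Nat) (hj : j < s.length), j < k → p s[j])
    (h2 : ∀ (j : Nat) (hj : j < s.length), k ≤ j → ¬ p s[j]) :
    s.countP p = k := by
  have hsplit : s = s.take k ++ s.drop k := (List.take_append_drop k s).symm
  rw [hsplit, List.countP_append]
  have htake : (s.take k).countP p = (s.take k).length := by
    apply List.countP_eq_length.mpr
    intro x hx
    obtain ⟨i, hi, hx⟩ := List.mem_iff_getElem.mp hx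
    have hi' : i < s.length := lt_of_lt_of_le (lt_of_lt_of_le hi (by simp)) (le_refl _)
    have : (s.take k)[i] = s[i]'(by simpa using hi') := List.getElem_take
    subst hx; rw [this]
    exact h1 i _ (lt_of_lt_of_le hi (by simp))
  have hdrop : (s.drop k).countP p = 0 := by
    apply List.countP_eq_zero.mpr
    intro x hx
    obtain ⟨i, hi, hx⟩ := List.mem_iff_getElem.mp hx
    have hi0 : i < s.length - k := by simpa using hi
    have hi' : k + i < s.length := by omega
    have : (s.drop k)[i] = s[k + i]'hi' := List.getElem_drop
    subst hx; rw [this]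
    exact h2 (k + i) hi' (Nat.le_add_right _ _)
  rw [htake, hdrop, List.length_take, Nat.min_eq_left hk]
  omega

theorem pv_bisectLeft_eq_countP (s : List Int) (x : Int)
    (hs : s.Pairwise (fun a b => a ≤ b)) :
    PySem.List.bisectLeft s x = s.countP (fun y => y < x) := by
  obtain ⟨hle, h1, h2⟩ := PySem.List.bisectLeft_spec s x hs
  exact (pv_countP_eq_of_indices s _ _ hle
    (fun j hj hjk => by simpa using h1 j hj hjk)
    (fun j hj hkj => by simpa using not_lt.mpr (h2 j hj hkj))).symm

theorem pv_bisectRight_eq_countP (s : List Int) (x : Int)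
    (hs : s.Pairwise (fun a b => a ≤ b)) :
    PySem.List.bisectRight s x = s.countP (fun y => y ≤ x) := by
  obtain ⟨hle, h1, h2⟩ := PySem.List.bisectRight_spec s x hs
  exact (pv_countP_eq_of_indices s _ _ hle
    (fun j hj hjk => by simpa using h1 j hj hjk)
    (fun j hj hkj => by simpa using not_le.mpr (h2 j hj hkj))).symm

-- B's fold computes the two counts
theorem pv_fold_counts (array : List Int) (lo hi : Int) (a b : Int) :
    array.foldl (fun (acc : Int × Int) x =>
      (if x ≤ hi then acc.1 + 1 else acc.1,
       if x < lo then acc.2 + 1 else acc.2)) (a, b)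
    = (a + array.countP (fun y => y ≤ hi), b + array.countP (fun y => y < lo)) := by
  induction array generalizing a b with
  | nil => simp
  | cons x xs ih =>
    simp only [List.foldl_cons, List.countP_cons, ih]
    split_ifs <;> simp_all [Prod.ext_iff] <;> omega

-- ===== VERDICT (by name: the statement is the Claim_ definition above) =====
theorem fast_search_spec : Claim_equal_fast_search := by
  intro array queries _
  unfold Spec_fast_search fast_search fast_search_alt
  apply List.map_congr_left
  intro q _
  have hs : (PySem.List.sorted array (fun x => x) false).Pairwise (fun a b => a ≤ b) := by
    simpa using PySem.List.sorted_pairwise array (fun x => x)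
  have hperm := PySem.List.sorted_perm array (fun x => x) false
  simp only [pv_bisectLeft_eq_countP _ _ hs, pv_bisectRight_eq_countP _ _ hs,
    hperm.countP_eq, pv_fold_counts]
  ring
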